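-- pv_equiv track=rewrite | github.com/khadijamasood447-lgtm/seismic-dsp-dashboard | scripts/analyze_cyclic_triaxial_folder.py | count_gds_points_from_text
-- ===== SOURCE A (Python) =====
-- def count_gds_points_from_text(text: str) -> int:
--     lines = text.splitlines()
--     header = None
--     for i, line in enumerate(lines):
--         if '"Stage Number"' in line:
--             header = i
--             break
--     if header is None:
--         return 0
--     return max(0, len(lines) - (header + 1))
-- ===== SOURCE B (Python) =====
-- def count_gds_points_from_text(text: str) -> int:
--     seen = False
--     count = 0
--     for line in text.splitlines():
--         if seen:
--             count += 1
--         elif '"Stage Number"' in line: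
--             seen = True
--     return count
-- ===== Notes on version B (the rewrite author's own statement) =====
-- stated objective: simpler
-- what changed: B counts lines after the marker in a single flag-carrying pass instead of locating the header index and subtracting it from len(lines).
import Mathlib
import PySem

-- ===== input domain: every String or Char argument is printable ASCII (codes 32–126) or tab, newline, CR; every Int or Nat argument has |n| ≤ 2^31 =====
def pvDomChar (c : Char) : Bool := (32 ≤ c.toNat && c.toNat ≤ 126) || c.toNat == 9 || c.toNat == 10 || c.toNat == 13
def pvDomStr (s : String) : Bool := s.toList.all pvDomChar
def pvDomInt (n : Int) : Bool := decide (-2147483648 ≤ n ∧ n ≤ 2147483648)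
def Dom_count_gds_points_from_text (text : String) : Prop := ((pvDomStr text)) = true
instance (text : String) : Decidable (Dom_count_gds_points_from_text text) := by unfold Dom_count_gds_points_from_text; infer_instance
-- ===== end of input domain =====

-- B replaces A's find-header-index-then-subtract arithmetic with a single flag-carrying counting pass (objective: simpler).

-- ===== PORT A =====
-- the 'for i, line in enumerate(lines): … break' search, carrying the enumerate index i
def pvFindHeader (lines : List String) (i : Nat) : Option Nat :=
  match lines with
  | [] => none
  | l :: rest =>
      if PySem.Str.isIn "\"Stage Number\"" l then some i else pvFindHeader rest (i + 1)

def count_gds_points_from_text (text : String) : Int :=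
  let lines := PySem.Str.splitlines text
  match pvFindHeader lines 0 with
  | none => 0
  | some header => max 0 ((lines.length : Int) - ((header : Int) + 1))

-- ===== PORT B =====
-- the single pass with a 'seen' flag and a running count
def pvBLoop (lines : List String) (seen : Bool) (count : Int) : Int :=
  match lines with
  | [] => count
  | l :: rest =>
      if seen then pvBLoop rest seen (count + 1)
      else if PySem.Str.isIn "\"Stage Number\"" l then pvBLoop rest true count
      else pvBLoop rest seen count

def count_gds_points_from_text_alt (text : String) : Int :=
  pvBLoop (PySem.Str.splitlines text) false 0

-- ===== PRECONDITION & SPEC =====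
def Spec_count_gds_points_from_text (text : String) (out : Int) : Prop := out = count_gds_points_from_text_alt text
instance (text : String) (out : Int) : Decidable (Spec_count_gds_points_from_text text out) := by unfold Spec_count_gds_points_from_text; infer_instance

-- ===== CLAIM (what is proved, stated in full; the proofs are below) =====
def Claim_equal_count_gds_points_from_text : Prop := ∀ (text : String), Dom_count_gds_points_from_text text → Spec_count_gds_points_from_text text (count_gds_points_from_text text)

-- ===== LEMMAS AND PROOFS =====
theorem pvBLoop_seen (lines : List String) (c : Int) :
    pvBLoop lines true c = c + lines.length := by
  induction lines generalizing c with
  | nil => simp [pvBLoop]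
  | cons l rest ih => simp [pvBLoop, ih]; omega

theorem pvBLoop_eq (lines : List String) (i : Nat) :
    pvBLoop lines false 0 =
      (match pvFindHeader lines i with
       | none => 0
       | some h => max 0 ((lines.length : Int) - (((h : Int) - (i : Int)) + 1))) := by
  induction lines generalizing i with
  | nil => simp [pvBLoop, pvFindHeader]
  | cons l rest ih =>
    show (if PySem.Str.isIn "\"Stage Number\"" l then pvBLoop rest true 0
          else pvBLoop rest false 0) = _
    by_cases hm : PySem.Str.isIn "\"Stage Number\"" l
    · rw [if_pos hm]
      show _ = (match (if PySem.Str.isIn "\"Stage Number\"" l then some i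
                       else pvFindHeader rest (i + 1)) with
                | none => (0 : Int)
                | some h => max 0 (((l :: rest).length : Int) - (((h : Int) - (i : Int)) + 1)))
      rw [if_pos hm, pvBLoop_seen]
      simp only [List.length_cons]
      push_cast
      rw [show ((rest.length : Int) + 1 - (((i : Int) - (i : Int)) + 1)) = (rest.length : Int) by ring,
          max_eq_right (Int.natCast_nonneg rest.length)]
      ring
    · rw [if_neg hm]
      show _ = (match (if PySem.Str.isIn "\"Stage Number\"" l then some i
                       else pvFindHeader rest (i + 1)) with
                | none => (0 : Int)
                | some h => max 0 (((l :: rest).length : Int) - (((h : Int) - (i : Int)) + 1)))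
      rw [if_neg hm, ih (i + 1)]
      cases h : pvFindHeader rest (i + 1) with
      | none => simp
      | some k =>
        simp only [List.length_cons]
        push_cast
        rw [show ((rest.length : Int) + 1 - (((k : Int) - (i : Int)) + 1))
              = ((rest.length : Int) - (((k : Int) - ((i : Int) + 1)) + 1)) by ring]

-- ===== VERDICT (by name: the statement is the Claim_ definition above) =====
theorem count_gds_points_from_text_spec : Claim_equal_count_gds_points_from_text := by
  intro text _
  unfold Spec_count_gds_points_from_text count_gds_points_from_text count_gds_points_from_text_alt
  rw [pvBLoop_eq (PySem.Str.splitlines text) 0]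
  cases h : pvFindHeader (PySem.Str.splitlines text) 0 with
  | none => simp [h]
  | some k => simp [h]
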